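-- pv_equiv track=rewrite | github.com/ree84375-del/-ai-study-platform- | build_cap_practice_library.py | infer_missing_question_page
-- ===== SOURCE A (Python) =====
-- def infer_missing_question_page(
--     candidate_buckets: dict[int, list[dict]],
--     missing_number: int,
--     default_page: int = 1,
-- ) -> int:
--     previous_candidates = [number for number in candidate_buckets if number < missing_number]
--     next_candidates = [number for number in candidate_buckets if number > missing_number]
--
--     previous_page = None
--     next_page = None
--     if previous_candidates:
--         previous_page = candidate_buckets[max(previous_candidates)][0].get("page_number")
--     if next_candidates:
--         next_page = candidate_buckets[min(next_candidates)][0].get("page_number")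
--
--     if previous_page and next_page and previous_page == next_page:
--         return int(previous_page)
--     if next_page:
--         return int(next_page)
--     if previous_page:
--         return int(previous_page)
--     return int(default_page)
-- ===== SOURCE B (Python) =====
-- def infer_missing_question_page(
--     candidate_buckets: dict[int, list[dict]],
--     missing_number: int,
--     default_page: int = 1,
-- ) -> int:
--     # Sort the keys once, then locate the neighbours of missing_number with two
--     # binary searches (hand-written bisect_left / bisect_right: the module imports nothing).
--     keys = sorted(candidate_buckets)
--
--     lo, hi = 0, len(keys)
--     while lo < hi:
--         mid = (lo + hi) // 2
--         if keys[mid] < missing_number: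
--             lo = mid + 1
--         else:
--             hi = mid
--     left = lo  # == bisect.bisect_left(keys, missing_number)
--
--     lo, hi = 0, len(keys)
--     while lo < hi:
--         mid = (lo + hi) // 2
--         if missing_number < keys[mid]:
--             hi = mid
--         else:
--             lo = mid + 1
--     right = lo  # == bisect.bisect_right(keys, missing_number)
--
--     next_page = None
--     previous_page = None
--     if right < len(keys):
--         next_page = candidate_buckets[keys[right]][0].get("page_number")
--     if left > 0:
--         previous_page = candidate_buckets[keys[left - 1]][0].get("page_number")
--
--     # When both neighbours exist and their pages agree, returning the next page
--     # is the same value, so two branches suffice.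
--     if next_page:
--         return int(next_page)
--     if previous_page:
--         return int(previous_page)
--     return int(default_page)
-- ===== Notes on version B (the rewrite author's own statement) =====
-- stated objective: alternative
-- what changed: B sorts the keys once and locates missing_number's neighbours with two hand-written binary searches (bisect_left/bisect_right) on the sorted key list instead of A's two filtering comprehensions with max()/min(), and collapses the four-branch return cascade to two branches (the equal-and-both branch returns the same value as the next-page branch).
import Mathlib
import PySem

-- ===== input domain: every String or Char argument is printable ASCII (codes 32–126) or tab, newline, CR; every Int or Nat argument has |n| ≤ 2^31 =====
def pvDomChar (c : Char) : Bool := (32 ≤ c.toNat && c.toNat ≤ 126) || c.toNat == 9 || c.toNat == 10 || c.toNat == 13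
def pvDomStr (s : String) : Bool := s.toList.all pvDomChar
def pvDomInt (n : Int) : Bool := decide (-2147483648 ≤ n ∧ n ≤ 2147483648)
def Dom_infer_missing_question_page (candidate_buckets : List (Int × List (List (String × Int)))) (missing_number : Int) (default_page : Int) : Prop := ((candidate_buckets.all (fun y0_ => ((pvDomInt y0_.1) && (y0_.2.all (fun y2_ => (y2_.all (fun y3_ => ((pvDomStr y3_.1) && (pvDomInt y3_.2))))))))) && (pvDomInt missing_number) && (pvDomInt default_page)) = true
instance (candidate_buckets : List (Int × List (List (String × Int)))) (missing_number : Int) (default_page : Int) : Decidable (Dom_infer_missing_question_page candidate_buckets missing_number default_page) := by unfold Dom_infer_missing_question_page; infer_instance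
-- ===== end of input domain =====

-- B sorts the keys once and finds missing_number's neighbours by two binary searches
-- (bisect_left / bisect_right) instead of A's two filtering comprehensions with max()/min();
-- the four-branch return cascade collapses to two (alternative algorithm, not faster).


-- Python truthiness of an Optional[int]: None and 0 are falsy.
def optTruthy (o : Option Int) : Bool :=
  match o with
  | none => false
  | some v => v != 0

-- cb[k][0].get("page_number") — shared dict/index primitive of both sources
-- (none where the Python [0] would raise IndexError; excluded by Pre_).
def bucketPage (candidate_buckets : List (Int × List (List (String × Int)))) (k : Int) : Option Int :=
  ((PySem.Dict.mk candidate_buckets).get? k).bind fun v =>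
    (PySem.List.pyGet? v 0).bind fun q => (PySem.Dict.mk q).get? "page_number"

-- ===== PORT A =====
def infer_missing_question_page (candidate_buckets : List (Int × List (List (String × Int)))) (missing_number : Int) (default_page : Int) : Int :=
  let previous_candidates := (candidate_buckets.map Prod.fst).filter (fun n => n < missing_number)
  let next_candidates := (candidate_buckets.map Prod.fst).filter (fun n => missing_number < n)
  let previous_page : Option Int :=
    if previous_candidates.isEmpty then none
    else match PySem.List.max? previous_candidates (fun x => x) with
      | none => none
      | some k => bucketPage candidate_buckets k
  let next_page : Option Int :=
    if next_candidates.isEmpty then none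
    else match PySem.List.min? next_candidates (fun x => x) with
      | none => none
      | some k => bucketPage candidate_buckets k
  if optTruthy previous_page && optTruthy next_page && previous_page == next_page then
    previous_page.getD 0
  else if optTruthy next_page then next_page.getD 0
  else if optTruthy previous_page then previous_page.getD 0
  else default_page

-- ===== PORT B =====
-- Source B's hand-written while loops are CPython's bisect_left / bisect_right verbatim;
-- PySem.List.bisectLeft / bisectRight are exactly that loop.
def infer_missing_question_page_alt (candidate_buckets : List (Int × List (List (String × Int)))) (missing_number : Int) (default_page : Int) : Int :=
  let keys := PySem.List.sorted (candidate_buckets.map Prod.fst) (fun x => x)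
  let left := PySem.List.bisectLeft keys missing_number
  let right := PySem.List.bisectRight keys missing_number
  let next_page : Option Int :=
    if right < keys.length then (keys[right]?).bind (bucketPage candidate_buckets) else none
  let previous_page : Option Int :=
    if 0 < left then (keys[left - 1]?).bind (bucketPage candidate_buckets) else none
  if optTruthy next_page then next_page.getD 0
  else if optTruthy previous_page then previous_page.getD 0
  else default_page

-- ===== PRECONDITION & SPEC =====
-- Pre_ excludes association lists with duplicate keys (a Python dict cannot hold them; the
-- collapsed-dict value is accidental) and inputs whose selected neighbour bucket is the empty
-- list, on which Python A raises IndexError at [0].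
def Pre_infer_missing_question_page (candidate_buckets : List (Int × List (List (String × Int)))) (missing_number : Int) (default_page : Int) : Prop :=
  (candidate_buckets.map Prod.fst).Nodup ∧
  ∀ p ∈ candidate_buckets,
    ((p.1 < missing_number ∧ ∀ q ∈ candidate_buckets, q.1 < missing_number → q.1 ≤ p.1) → p.2 ≠ []) ∧
    ((missing_number < p.1 ∧ ∀ q ∈ candidate_buckets, missing_number < q.1 → p.1 ≤ q.1) → p.2 ≠ [])
instance (candidate_buckets : List (Int × List (List (String × Int)))) (missing_number : Int) (default_page : Int) : Decidable (Pre_infer_missing_question_page candidate_buckets missing_number default_page) := by unfold Pre_infer_missing_question_page; infer_instance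

def pvWitness_infer_missing_question_page : (List (Int × List (List (String × Int)))) × Int × Int :=
  ([(1, [[("page_number", 2)]]), (5, [[("page_number", 7)]])], 3, 1)

def Spec_infer_missing_question_page (candidate_buckets : List (Int × List (List (String × Int)))) (missing_number : Int) (default_page : Int) (out : Int) : Prop := out = infer_missing_question_page_alt candidate_buckets missing_number default_page
instance (candidate_buckets : List (Int × List (List (String × Int)))) (missing_number : Int) (default_page : Int) (out : Int) : Decidable (Spec_infer_missing_question_page candidate_buckets missing_number default_page out) := by unfold Spec_infer_missing_question_page; infer_instance

-- ===== CLAIM (what is proved, stated in full; the proofs are below) =====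
def Claim_equal_infer_missing_question_page : Prop := ∀ (candidate_buckets : List (Int × List (List (String × Int)))) (missing_number : Int) (default_page : Int), Dom_infer_missing_question_page candidate_buckets missing_number default_page → Pre_infer_missing_question_page candidate_buckets missing_number default_page → Spec_infer_missing_question_page candidate_buckets missing_number default_page (infer_missing_question_page candidate_buckets missing_number default_page)

-- ===== LEMMAS AND PROOFS =====

-- A guards with "if candidates nonempty" before taking max/min; the guard is redundant
-- because max?/min? are none exactly on the empty list
theorem guard_max (l : List Int) (f : Int → Option Int) :
    (if l.isEmpty then none
     else match PySem.List.max? l (fun x => x) with | none => none | some k => f k)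
    = (PySem.List.max? l (fun x => x)).bind f := by
  cases hl : PySem.List.max? l (fun x => x) with
  | none => simp_all [PySem.List.max?_eq_none_iff]
  | some k =>
    have := List.ne_nil_of_mem (PySem.List.max?_mem hl)
    simp_all

theorem guard_min (l : List Int) (f : Int → Option Int) :
    (if l.isEmpty then none
     else match PySem.List.min? l (fun x => x) with | none => none | some k => f k)
    = (PySem.List.min? l (fun x => x)).bind f := by
  cases hl : PySem.List.min? l (fun x => x) with
  | none => simp_all [PySem.List.min?_eq_none_iff]
  | some k =>
    have := List.ne_nil_of_mem (PySem.List.min?_mem hl)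
    simp_all

-- the sorted keys indexed at bisect_left − 1 ARE max(keys filtered below m)
theorem prev_key_eq (keys : List Int) (m : Int) :
    (if 0 < PySem.List.bisectLeft (PySem.List.sorted keys (fun x => x)) m then
       (PySem.List.sorted keys (fun x => x))[PySem.List.bisectLeft (PySem.List.sorted keys (fun x => x)) m - 1]?
     else none)
    = PySem.List.max? (keys.filter (fun n => n < m)) (fun x => x) := by
  set ks := PySem.List.sorted keys (fun x => x) with hks
  set L := PySem.List.bisectLeft ks m with hL
  have hperm : ks.Perm keys := PySem.List.sorted_perm keys (fun x => x) false
  have hpw : ks.Pairwise (fun a b => a ≤ b) := PySem.List.sorted_pairwise keys (fun x => x)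
  obtain ⟨hLlen, hlt, hge⟩ := PySem.List.bisectLeft_spec ks m hpw
  cases hmax : PySem.List.max? (keys.filter (fun n => n < m)) (fun x => x) with
  | none =>
    have hfil : keys.filter (fun n => n < m) = [] :=
      (PySem.List.max?_eq_none_iff _ _).mp hmax
    rw [if_neg]
    intro h0
    have hlen : L - 1 < ks.length := by omega
    have hltm : ks[L - 1] < m := hlt _ hlen (by omega)
    have hmem : ks[L - 1] ∈ keys := hperm.mem_iff.mp (List.getElem_mem hlen)
    have : ks[L - 1] ∈ keys.filter (fun n => n < m) :=
      List.mem_filter.mpr ⟨hmem, by simpa using hltm⟩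
    simp [hfil] at this
  | some k =>
    have hkmem := PySem.List.max?_mem hmax
    have hkkeys : k ∈ keys := (List.mem_filter.mp hkmem).1
    have hkm : k < m := by simpa using (List.mem_filter.mp hkmem).2
    obtain ⟨j, hj, hjk⟩ := List.getElem_of_mem (hperm.mem_iff.mpr hkkeys)
    have hjL : j < L := by
      by_contra hc
      exact absurd (hge j hj (by omega)) (by rw [hjk]; omega)
    have h0 : 0 < L := by omega
    have hlen : L - 1 < ks.length := by omega
    have hltm : ks[L - 1] < m := hlt _ hlen (by omega)
    have hmemf : ks[L - 1] ∈ keys.filter (fun n => n < m) :=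
      List.mem_filter.mpr ⟨hperm.mem_iff.mp (List.getElem_mem hlen), by simpa using hltm⟩
    have h1 : ks[L - 1] ≤ k := PySem.List.max?_isMax hmax _ hmemf
    have h2 : k ≤ ks[L - 1] := by
      rw [← hjk]
      exact PySem.List.sorted_id_getElem_mono keys (by omega) hlen
    rw [if_pos h0, List.getElem?_eq_getElem hlen]
    exact congrArg some (le_antisymm h1 h2)

-- the sorted keys indexed at bisect_right ARE min(keys filtered above m)
theorem next_key_eq (keys : List Int) (m : Int) :
    (if PySem.List.bisectRight (PySem.List.sorted keys (fun x => x)) m < (PySem.List.sorted keys (fun x => x)).length then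
       (PySem.List.sorted keys (fun x => x))[PySem.List.bisectRight (PySem.List.sorted keys (fun x => x)) m]?
     else none)
    = PySem.List.min? (keys.filter (fun n => m < n)) (fun x => x) := by
  set ks := PySem.List.sorted keys (fun x => x) with hks
  set R := PySem.List.bisectRight ks m with hR
  have hperm : ks.Perm keys := PySem.List.sorted_perm keys (fun x => x) false
  have hpw : ks.Pairwise (fun a b => a ≤ b) := PySem.List.sorted_pairwise keys (fun x => x)
  obtain ⟨hRlen, hle, hgt⟩ := PySem.List.bisectRight_spec ks m hpw
  cases hmin : PySem.List.min? (keys.filter (fun n => m < n)) (fun x => x) with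
  | none =>
    have hfil : keys.filter (fun n => m < n) = [] :=
      (PySem.List.min?_eq_none_iff _ _).mp hmin
    rw [if_neg]
    intro h0
    have hgtm : m < ks[R] := hgt _ h0 (by omega)
    have : ks[R] ∈ keys.filter (fun n => m < n) :=
      List.mem_filter.mpr ⟨hperm.mem_iff.mp (List.getElem_mem h0), by simpa using hgtm⟩
    simp [hfil] at this
  | some k =>
    have hkmem := PySem.List.min?_mem hmin
    have hkkeys : k ∈ keys := (List.mem_filter.mp hkmem).1
    have hkm : m < k := by simpa using (List.mem_filter.mp hkmem).2
    obtain ⟨j, hj, hjk⟩ := List.getElem_of_mem (hperm.mem_iff.mpr hkkeys)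
    have hjR : R ≤ j := by
      by_contra hc
      exact absurd (hle j hj (by omega)) (by rw [hjk]; omega)
    have h0 : R < ks.length := by omega
    have hgtm : m < ks[R] := hgt _ h0 (le_refl R)
    have hmemf : ks[R] ∈ keys.filter (fun n => m < n) :=
      List.mem_filter.mpr ⟨hperm.mem_iff.mp (List.getElem_mem h0), by simpa using hgtm⟩
    have h1 : k ≤ ks[R] := PySem.List.min?_isMin hmin _ hmemf
    have h2 : ks[R] ≤ k := by
      rw [← hjk]
      exact PySem.List.sorted_id_getElem_mono keys hjR hj
    rw [if_pos h0, List.getElem?_eq_getElem h0]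
    exact congrArg some (le_antisymm h2 h1)

-- push bucketPage through the neighbour-key options
theorem bind_if (c : Prop) [Decidable c] (o : Option Int) (f : Int → Option Int) :
    (if c then o.bind f else none) = (if c then o else none).bind f := by
  split_ifs <;> simp

-- A's equal-and-both branch returns the same value as the next-page branch
theorem cascade_eq (pv nv : Option Int) (d : Int) :
    (if optTruthy pv && optTruthy nv && pv == nv then pv.getD 0
     else if optTruthy nv then nv.getD 0
     else if optTruthy pv then pv.getD 0 else d)
    = (if optTruthy nv then nv.getD 0 else if optTruthy pv then pv.getD 0 else d) := by
  by_cases h : pv = nv <;> cases pv <;> cases nv <;> simp_all [optTruthy]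

-- ===== VERDICT (by name: the statement is the Claim_ definition above) =====
theorem infer_missing_question_page_spec : Claim_equal_infer_missing_question_page := by
  intro cb m d _ _
  unfold Spec_infer_missing_question_page infer_missing_question_page infer_missing_question_page_alt
  simp only
  rw [guard_max, guard_min, bind_if, bind_if, prev_key_eq, next_key_eq]
  exact cascade_eq _ _ _
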